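-- pv_equiv track=rewrite | github.com/joshanashakya/dissertation | workspace/dataset/java-python/GeeksForGeeks/3229/A/2.py | maxEvenLenSum
-- ===== SOURCE A (Python) =====
-- def maxEvenLenSum(arr, n):
--
--     # There has to be at
--     # least 2 elements
--     if (n < 2):
--         return 0
--
--     # dp[i] will store the maximum
--     # subarray sum of even length
--     # starting at arr[i]
--     dp = [0 for i in range(n)]
--
--     # Valid subarray cannot start from
--     # the last element as its
--     # length has to be even
--     dp[n - 1] = 0
--     dp[n - 2] = arr[n - 2] + arr[n - 1]
--
--     for i in range(n - 3, -1, -1):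
--
--         # arr[i] and arr[i + 1] can be added
--         # to get an even length subarray
--         # starting at arr[i]
--         dp[i] = arr[i] + arr[i + 1]
--
--         # If the sum of the valid subarray
--         # starting from arr[i + 2] is
--         # greater than 0 then it can be added
--         # with arr[i] and arr[i + 1]
--         # to maximize the sum of the
--         # subarray starting from arr[i]
--         if (dp[i + 2] > 0):
--             dp[i] += dp[i + 2]
--
--     # Get the sum of the even length
--     # subarray with maximum sum
--     maxSum = max(dp)
--     return maxSum
-- ===== SOURCE B (Python) =====
-- def maxEvenLenSum(arr, n):
--     # Single forward pass over prefix sums: an even-length subarray ending at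
--     # prefix index k subtracts an earlier prefix of the same parity; keep the
--     # minimum prefix seen at even and at odd positions.
--     if n < 2:
--         return 0
--     best = 0
--     p = 0
--     min_even = 0      # prefix sum P[0] (even position)
--     min_odd = None    # no odd-position prefix seen yet
--     for k in range(1, n + 1):
--         p += arr[k - 1]
--         m = min_even if k % 2 == 0 else min_odd
--         if m is not None and p - m > best:
--             best = p - m
--         if k % 2 == 0:
--             if p < min_even:
--                 min_even = p
--         else:
--             if min_odd is None or p < min_odd:
--                 min_odd = p
--     return best
-- ===== Notes on version B (the rewrite author's own statement) =====
-- stated objective: alternative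
-- what changed: Replaces the backwards dp-array (dp[i] = best even-length subarray starting at i, then max over the array) by a single forward pass over running prefix sums that keeps the minimum prefix value seen at even and at odd positions and maximizes P[k] minus the matching-parity minimum, using O(1) extra space instead of the O(n) dp list.
import Mathlib
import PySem

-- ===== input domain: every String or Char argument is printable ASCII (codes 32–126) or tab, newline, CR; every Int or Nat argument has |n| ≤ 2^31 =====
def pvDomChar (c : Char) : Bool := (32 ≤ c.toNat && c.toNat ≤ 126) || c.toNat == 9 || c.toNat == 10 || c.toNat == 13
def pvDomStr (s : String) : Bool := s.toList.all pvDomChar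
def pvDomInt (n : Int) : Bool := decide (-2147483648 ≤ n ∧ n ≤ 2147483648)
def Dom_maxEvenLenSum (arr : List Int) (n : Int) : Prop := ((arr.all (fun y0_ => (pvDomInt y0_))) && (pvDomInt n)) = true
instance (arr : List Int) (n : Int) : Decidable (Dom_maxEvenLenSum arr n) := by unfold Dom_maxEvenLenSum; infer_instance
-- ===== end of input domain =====

-- B replaces A's backwards dp array by a one-pass prefix-sum scan keeping parity-wise
-- minimum prefixes (alternative algorithm, O(1) extra space); equivalence proved on Pre_.


-- ===== PORT A =====
-- one loop iteration of A: dp[i] = arr[i]+arr[i+1] (+ dp[i+2] if positive)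
def stepA (arr : List Int) (dp : List Int) (i : Int) : List Int :=
  let v := PySem.List.pyGetD arr i 0 + PySem.List.pyGetD arr (i+1) 0
  let v := if PySem.List.pyGetD dp (i+2) 0 > 0 then v + PySem.List.pyGetD dp (i+2) 0 else v
  PySem.List.pySetD dp i v

def maxEvenLenSum (arr : List Int) (n : Int) : Int :=
  if n < 2 then 0
  else
    let dp : List Int := (PySem.List.pyRange 0 n 1).map (fun _ => (0:Int))
    let dp := PySem.List.pySetD dp (n-1) 0
    let dp := PySem.List.pySetD dp (n-2)
      (PySem.List.pyGetD arr (n-2) 0 + PySem.List.pyGetD arr (n-1) 0)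
    let dp := (PySem.List.pyRange (n-3) (-1) (-1)).foldl (stepA arr) dp
    ((PySem.List.max? dp (fun x => x)).getD 0)

-- ===== PORT B =====
-- one loop iteration of B over state (best, p, min_even, min_odd)
def stepB (arr : List Int) (st : Int × Int × Int × Option Int) (k : Int) :
    Int × Int × Int × Option Int :=
  let p := st.2.1 + PySem.List.pyGetD arr (k-1) 0
  let minE := st.2.2.1
  let minO := st.2.2.2
  let m : Option Int := if PySem.Int.mod k 2 = 0 then some minE else minO
  let best := match m with
    | some mv => if st.1 < p - mv then p - mv else st.1
    | none => st.1
  if PySem.Int.mod k 2 = 0 then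
    (best, p, (if p < minE then p else minE), minO)
  else
    (best, p, minE,
      (match minO with
       | none => some p
       | some mv => some (if p < mv then p else mv)))

def maxEvenLenSum_alt (arr : List Int) (n : Int) : Int :=
  if n < 2 then 0
  else
    ((PySem.List.pyRange 1 (n+1) 1).foldl (stepB arr) (0, 0, 0, none)).1

-- ===== PRECONDITION & SPEC =====
-- Pre_ excludes exactly the inputs where A raises an IndexError: 2 ≤ n but arr has fewer than n elements.
def Pre_maxEvenLenSum (arr : List Int) (n : Int) : Prop := 2 ≤ n → n ≤ (arr.length : Int)
instance (arr : List Int) (n : Int) : Decidable (Pre_maxEvenLenSum arr n) := by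
  unfold Pre_maxEvenLenSum; infer_instance

def pvWitness_maxEvenLenSum : List Int × Int := ([1, -2, 3, 4], 4)

def Spec_maxEvenLenSum (arr : List Int) (n : Int) (out : Int) : Prop := out = maxEvenLenSum_alt arr n
instance (arr : List Int) (n : Int) (out : Int) : Decidable (Spec_maxEvenLenSum arr n out) := by unfold Spec_maxEvenLenSum; infer_instance

-- ===== CLAIM (what is proved, stated in full; the proofs are below) =====
def Claim_equal_maxEvenLenSum : Prop := ∀ (arr : List Int) (n : Int), Dom_maxEvenLenSum arr n → Pre_maxEvenLenSum arr n → Spec_maxEvenLenSum arr n (maxEvenLenSum arr n)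

-- ===== LEMMAS AND PROOFS =====

-- prefix sum of the first k elements
def pSum (arr : List Int) (k : Nat) : Int := (arr.take k).sum

-- the value both programs compute: max of 0 and all even-length window sums
def IsAns (arr : List Int) (n : Nat) (r : Int) : Prop :=
  0 ≤ r ∧
  (∀ a b : Nat, a < b → b ≤ n → (b - a) % 2 = 0 → pSum arr b - pSum arr a ≤ r) ∧
  (r = 0 ∨ ∃ a b : Nat, a < b ∧ b ≤ n ∧ (b - a) % 2 = 0 ∧ r = pSum arr b - pSum arr a)

lemma IsAns_unique (arr : List Int) (n : Nat) (r1 r2 : Int)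
    (h1 : IsAns arr n r1) (h2 : IsAns arr n r2) : r1 = r2 := by
  obtain ⟨hn1, hu1, ha1⟩ := h1
  obtain ⟨hn2, hu2, ha2⟩ := h2
  apply le_antisymm
  · rcases ha1 with h | ⟨a, b, hab, hb, hp, he⟩
    · omega
    · exact he ▸ hu2 a b hab hb hp
  · rcases ha2 with h | ⟨a, b, hab, hb, hp, he⟩
    · omega
    · exact he ▸ hu1 a b hab hb hp

lemma pSum_succ (arr : List Int) (k : Nat) (hk : k < arr.length) :
    pSum arr (k+1) = pSum arr k + arr.getD k 0 := by
  unfold pSum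
  rw [List.sum_take_succ arr k hk]
  simp [List.getD_eq_getElem?_getD, List.getElem?_eq_getElem hk]

-- A's dp value as a recursion on the start index
def Dfun (arr : List Int) (n : Nat) (i : Nat) : Int :=
  if i + 2 ≤ n then
    arr.getD i 0 + arr.getD (i+1) 0 + max 0 (Dfun arr n (i+2))
  else 0
termination_by n - i

lemma Dfun_stop (arr : List Int) (n i : Nat) (h : ¬ i + 2 ≤ n) : Dfun arr n i = 0 := by
  rw [Dfun]; simp [h]

lemma Dfun_window (arr : List Int) (n i : Nat) (hlen : n ≤ arr.length) (h : i + 2 ≤ n) :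
    pSum arr (i+2) - pSum arr i = arr.getD i 0 + arr.getD (i+1) 0 := by
  rw [pSum_succ arr (i+1) (by omega), pSum_succ arr i (by omega)]; ring

lemma Dfun_upper (arr : List Int) (n : Nat) (hlen : n ≤ arr.length) :
    ∀ i b : Nat, i < b → b ≤ n → (b - i) % 2 = 0 → pSum arr b - pSum arr i ≤ Dfun arr n i := by
  have key : ∀ fuel i b : Nat, b - i ≤ fuel → i < b → b ≤ n → (b - i) % 2 = 0 →
      pSum arr b - pSum arr i ≤ Dfun arr n i := by
    intro fuel
    induction fuel with
    | zero => intro i b h1 h2; omega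
    | succ f ih =>
      intro i b hf hib hbn hpar
      have h2 : i + 2 ≤ n := by omega
      rw [Dfun, if_pos h2]
      by_cases hb2 : b = i + 2
      · subst hb2
        have := Dfun_window arr n i hlen h2
        have h0 : (0:Int) ≤ max 0 (Dfun arr n (i+2)) := le_max_left _ _
        omega
      · have h4 : i + 2 < b := by omega
        have hrec := ih (i+2) b (by omega) h4 hbn (by omega)
        have hw := Dfun_window arr n i hlen h2
        have h0 : Dfun arr n (i+2) ≤ max 0 (Dfun arr n (i+2)) := le_max_right _ _
        omega
  intro i b h1 h2 h3; exact key (b - i) i b le_rfl h1 h2 h3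

lemma Dfun_attain (arr : List Int) (n : Nat) (hlen : n ≤ arr.length) :
    ∀ i : Nat, i + 2 ≤ n →
    ∃ b : Nat, i < b ∧ b ≤ n ∧ (b - i) % 2 = 0 ∧ Dfun arr n i = pSum arr b - pSum arr i := by
  have key : ∀ fuel i : Nat, n - i ≤ fuel → i + 2 ≤ n →
      ∃ b : Nat, i < b ∧ b ≤ n ∧ (b - i) % 2 = 0 ∧ Dfun arr n i = pSum arr b - pSum arr i := by
    intro fuel
    induction fuel with
    | zero => intro i h1 h2; omega
    | succ f ih =>
      intro i hf h2
      rw [Dfun, if_pos h2]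
      have hw := Dfun_window arr n i hlen h2
      by_cases hpos : 0 < Dfun arr n (i+2)
      · have h4 : i + 2 + 2 ≤ n := by
          by_contra hc
          rw [Dfun_stop arr n (i+2) hc] at hpos; omega
        obtain ⟨b, hb1, hb2, hb3, hb4⟩ := ih (i+2) (by omega) h4
        refine ⟨b, by omega, hb2, by omega, ?_⟩
        rw [max_eq_right (le_of_lt hpos), hb4]; omega
      · refine ⟨i+2, by omega, h2, by omega, ?_⟩
        rw [max_eq_left (by omega)]; omega
  intro i h; exact key (n - i) i le_rfl h

lemma getD_set_if (l : List Int) (k j : Nat) (v : Int) (h : j < l.length) :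
    (l.set k v).getD j 0 = if k = j then v else l.getD j 0 := by
  simp only [List.getD_eq_getElem?_getD, List.getElem?_set]
  split_ifs <;> simp_all

-- the A loop establishes dp[j] = Dfun j
lemma loopA (arr : List Int) (n : Nat) (_hlen : n ≤ arr.length) :
    ∀ (fuel : Nat) (i : Int) (dp : List Int), i = (fuel : Int) - 1 → i ≤ (n:Int) - 3 →
      dp.length = n →
      (∀ j : Nat, i < (j:Int) → j < n → dp.getD j 0 = Dfun arr n j) →
      ((PySem.List.pyRange i (-1) (-1)).foldl (stepA arr) dp).length = n ∧
      (∀ j : Nat, j < n →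
        ((PySem.List.pyRange i (-1) (-1)).foldl (stepA arr) dp).getD j 0 = Dfun arr n j) := by
  intro fuel
  induction fuel with
  | zero =>
    intro i dp hi _ hlen2 hinv
    rw [PySem.List.pyRange_neg_one_eq_nil (by omega)]
    exact ⟨hlen2, fun j hj => hinv j (by omega) hj⟩
  | succ f ih =>
    intro i dp hi hi3 hlen2 hinv
    rw [PySem.List.pyRange_neg_one_cons (by omega), List.foldl_cons]
    have hkey : stepA arr dp i = dp.set f (Dfun arr n f) := by
      have hif : i = ((f:Nat) : Int) := by omega
      have hf2 : f + 2 < n := by omega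
      have hdp2 : PySem.List.pyGetD dp (i+2) 0 = Dfun arr n (f+2) := by
        rw [hif]
        have : ((f:Nat) : Int) + 2 = (((f+2 : Nat)) : Int) := by push_cast; ring
        rw [this, PySem.List.pyGetD_natCast]
        exact hinv (f+2) (by omega) hf2
      unfold stepA
      rw [hdp2, hif]
      have h1 : ((f:Nat) : Int) + 1 = (((f+1 : Nat)) : Int) := by push_cast; ring
      rw [h1]
      simp only [PySem.List.pyGetD_natCast, PySem.List.pySetD_natCast]
      congr 1
      have hval : Dfun arr n f = arr.getD f 0 + arr.getD (f+1) 0 + max 0 (Dfun arr n (f+2)) := by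
        rw [Dfun, if_pos (by omega : f + 2 ≤ n)]
      rw [hval]
      by_cases hlt : 0 < Dfun arr n (f+2)
      · rw [if_pos hlt, max_eq_right (le_of_lt hlt)]
      · rw [if_neg hlt, max_eq_left (by omega)]; ring
    rw [hkey]
    apply ih (i-1) _ (by omega) (by omega) (by simp [hlen2])
    intro j hj hjn
    rw [getD_set_if _ _ _ _ (by omega)]
    by_cases hjf : f = j
    · subst hjf; simp
    · rw [if_neg hjf]
      exact hinv j (by omega) hjn

-- A's result satisfies IsAns
lemma portA_isAns (arr : List Int) (n : Int) (h2 : 2 ≤ n) (hlen : n ≤ (arr.length : Int)) :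
    IsAns arr n.toNat (maxEvenLenSum arr n) := by
  have hln : n.toNat ≤ arr.length := by omega
  have h2' : 2 ≤ n.toNat := by omega
  unfold maxEvenLenSum
  rw [if_neg (by omega)]
  simp only []
  set dp0 : List Int := (PySem.List.pyRange 0 n 1).map (fun _ => (0:Int)) with hdp0
  have hlen0 : dp0.length = n.toNat := by
    rw [hdp0, List.length_map, PySem.List.length_pyRange_one]; omega
  have hget0 : ∀ j : Nat, dp0.getD j 0 = 0 := by
    intro j
    rw [hdp0]
    simp only [List.getD_eq_getElem?_getD, List.getElem?_map]
    cases (PySem.List.pyRange 0 n 1)[j]? <;> simp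
  set dp1 := PySem.List.pySetD dp0 (n-1) 0 with hdp1
  set dp2 := PySem.List.pySetD dp1 (n-2)
      (PySem.List.pyGetD arr (n-2) 0 + PySem.List.pyGetD arr (n-1) 0) with hdp2
  have hdp1' : dp1 = dp0.set (n.toNat - 1) 0 := by
    rw [hdp1, PySem.List.pySetD_of_nonneg _ _ (by omega)]
    congr 1; omega
  have hdp2' : dp2 = dp1.set (n.toNat - 2) (arr.getD (n.toNat - 2) 0 + arr.getD (n.toNat - 1) 0) := by
    rw [hdp2, PySem.List.pySetD_of_nonneg _ _ (by omega)]
    congr 1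
    · omega
    · rw [PySem.List.pyGetD_of_nonneg _ _ (by omega), PySem.List.pyGetD_of_nonneg _ _ (by omega)]
      congr 2 <;> omega
  have hlen1 : dp1.length = n.toNat := by rw [hdp1']; simp [hlen0]
  have hlen2 : dp2.length = n.toNat := by rw [hdp2']; simp [hlen1]
  have hD1 : Dfun arr n.toNat (n.toNat - 1) = 0 := Dfun_stop _ _ _ (by omega)
  have hD2 : Dfun arr n.toNat (n.toNat - 2) = arr.getD (n.toNat - 2) 0 + arr.getD (n.toNat - 1) 0 := by
    rw [Dfun, if_pos (by omega)]
    rw [Dfun_stop _ _ (n.toNat - 2 + 2) (by omega)]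
    have : n.toNat - 2 + 1 = n.toNat - 1 := by omega
    rw [this]; simp
  have hloop := loopA arr n.toNat hln (n.toNat - 2) (n - 3) dp2 (by omega) (by omega) hlen2 ?_
  · set dpf := (PySem.List.pyRange (n-3) (-1) (-1)).foldl (stepA arr) dp2 with hdpf
    obtain ⟨hlenf, hgetf⟩ := hloop
    have hne : dpf ≠ [] := by
      intro hnil; rw [hnil] at hlenf; simp at hlenf; omega
    obtain ⟨m, hm⟩ : ∃ m, PySem.List.max? dpf (fun x => x) = some m := by
      cases hmx : PySem.List.max? dpf (fun x => x) with
      | none => exact absurd ((PySem.List.max?_eq_none_iff dpf _).mp hmx) hne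
      | some m => exact ⟨m, rfl⟩
    rw [hm]
    simp only [Option.getD_some]
    have hmem := PySem.List.max?_mem hm
    have hmax := PySem.List.max?_isMax hm
    have helem : ∀ j : Nat, j < n.toNat → Dfun arr n.toNat j ≤ m := by
      intro j hj
      have : dpf.getD j 0 ∈ dpf := by
        rw [List.getD_eq_getElem?_getD, List.getElem?_eq_getElem (by omega)]
        exact List.getElem_mem _
      rw [hgetf j hj] at this
      exact hmax _ this
    refine ⟨?_, ?_, ?_⟩
    · have := helem (n.toNat - 1) (by omega)
      rw [hD1] at this; exact this
    · intro a b hab hbn hpar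
      have ha2 : a + 2 ≤ n.toNat := by omega
      calc pSum arr b - pSum arr a ≤ Dfun arr n.toNat a :=
            Dfun_upper arr n.toNat hln a b hab hbn hpar
        _ ≤ m := helem a (by omega)
    · obtain ⟨j, hj, hje⟩ := List.mem_iff_getElem.mp hmem
      have hjD : m = Dfun arr n.toNat j := by
        rw [← hje, ← hgetf j (by omega)]
        rw [List.getD_eq_getElem?_getD, List.getElem?_eq_getElem hj]
        rfl
      by_cases hj2 : j + 2 ≤ n.toNat
      · obtain ⟨b, hb1, hb2, hb3, hb4⟩ := Dfun_attain arr n.toNat hln j hj2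
        exact Or.inr ⟨j, b, hb1, hb2, hb3, by rw [hjD, hb4]⟩
      · exact Or.inl (by rw [hjD, Dfun_stop _ _ _ hj2])
  · intro j hj hjn
    rw [hdp2', getD_set_if _ _ _ _ (by omega)]
    by_cases hjeq : n.toNat - 2 = j
    · rw [if_pos hjeq, ← hjeq, hD2]
    · rw [if_neg hjeq, hdp1', getD_set_if _ _ _ _ (by omega)]
      have hj1 : n.toNat - 1 = j := by omega
      rw [if_pos hj1, ← hj1, hD1]

-- invariants for B's state
def InvMinE (arr : List Int) (k : Nat) (v : Int) : Prop :=
  (∃ a : Nat, a ≤ k ∧ a % 2 = 0 ∧ v = pSum arr a) ∧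
  (∀ a : Nat, a ≤ k → a % 2 = 0 → v ≤ pSum arr a)

def InvMinO (arr : List Int) (k : Nat) (o : Option Int) : Prop :=
  (k = 0 ∧ o = none) ∨
  (∃ m : Int, o = some m ∧ (∃ a : Nat, a ≤ k ∧ a % 2 = 1 ∧ m = pSum arr a) ∧
    (∀ a : Nat, a ≤ k → a % 2 = 1 → m ≤ pSum arr a))

def InvB (arr : List Int) (k : Nat) (st : Int × Int × Int × Option Int) : Prop :=
  st.2.1 = pSum arr k ∧ InvMinE arr k st.2.2.1 ∧ InvMinO arr k st.2.2.2 ∧ IsAns arr k st.1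

lemma IsAns_step (arr : List Int) (k : Nat) (best mv : Int)
    (hAns : IsAns arr k best)
    (hw : ∃ a : Nat, a ≤ k ∧ a % 2 = (k+1) % 2 ∧ mv = pSum arr a)
    (hb : ∀ a : Nat, a ≤ k → a % 2 = (k+1) % 2 → mv ≤ pSum arr a) :
    IsAns arr (k+1) (if best < pSum arr (k+1) - mv then pSum arr (k+1) - mv else best) := by
  obtain ⟨hnn, hup, hat⟩ := hAns
  have hbest_le : best ≤ (if best < pSum arr (k+1) - mv then pSum arr (k+1) - mv else best) := by
    split_ifs with h <;> omega
  have hcand_le : pSum arr (k+1) - mv ≤ (if best < pSum arr (k+1) - mv then pSum arr (k+1) - mv else best) := by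
    split_ifs with h <;> omega
  refine ⟨by omega, ?_, ?_⟩
  · intro a b hab hbn hpar
    by_cases hbk : b ≤ k
    · exact le_trans (hup a b hab hbk hpar) hbest_le
    · have hbeq : b = k + 1 := by omega
      subst hbeq
      have hpa : a % 2 = (k+1) % 2 := by omega
      have := hb a (by omega) hpa
      omega
  · split_ifs with h
    · obtain ⟨a, ha, hpa, hmv⟩ := hw
      exact Or.inr ⟨a, k+1, by omega, le_rfl, by omega, by omega⟩
    · rcases hat with h0 | ⟨a, b, h1, h2, h3, h4⟩
      · exact Or.inl h0
      · exact Or.inr ⟨a, b, h1, by omega, h3, h4⟩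

lemma loopB (arr : List Int) (n : Nat) (hlen : n ≤ arr.length) :
    ∀ k : Nat, k ≤ n →
      InvB arr k ((PySem.List.pyRange 1 ((k:Int)+1) 1).foldl (stepB arr) (0, 0, 0, none)) := by
  intro k
  induction k with
  | zero =>
    intro _
    rw [PySem.List.pyRange_one_eq_nil (by omega)]
    refine ⟨by simp [pSum], ⟨⟨0, le_rfl, rfl, by simp [pSum]⟩, ?_⟩, Or.inl ⟨rfl, rfl⟩,
      le_rfl, ?_, Or.inl rfl⟩
    · intro a ha _
      have : a = 0 := by omega
      subst this; simp [pSum]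
    · intro a b hab hb hpar; omega
  | succ k ih =>
    intro hk1
    obtain ⟨hP, hE, hO, hAns⟩ := ih (by omega)
    have hrange : PySem.List.pyRange 1 (((k+1 : Nat) : Int)+1) 1 =
        PySem.List.pyRange 1 ((k:Int)+1) 1 ++ [(k:Int)+1] := by
      have : ((k+1 : Nat) : Int) + 1 = ((k:Int)+1) + 1 := by push_cast; ring
      rw [this, PySem.List.pyRange_one_succ_right (by omega)]
    rw [hrange, List.foldl_append, List.foldl_cons, List.foldl_nil]
    set st := (PySem.List.pyRange 1 ((k:Int)+1) 1).foldl (stepB arr) (0, 0, 0, none) with hst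
    have hklen : k < arr.length := by omega
    have hp' : st.2.1 + PySem.List.pyGetD arr ((k:Int)+1-1) 0 = pSum arr (k+1) := by
      have he : (k:Int)+1-1 = ((k:Nat):Int) := by ring
      rw [he, PySem.List.pyGetD_natCast, hP, pSum_succ arr k hklen]
    have hmod : PySem.Int.mod ((k:Int)+1) 2 = (((k+1) % 2 : Nat) : Int) := by
      have he : (k:Int)+1 = ((k+1 : Nat) : Int) := by push_cast; ring
      rw [he]
      exact_mod_cast PySem.Int.mod_natCast (k+1) 2
    by_cases hpar : (k+1) % 2 = 0
    · -- k+1 is even: candidate from min_even, update min_even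
      have hmod0 : PySem.Int.mod ((k:Int)+1) 2 = 0 := by rw [hmod, hpar]; rfl
      obtain ⟨⟨a0, ha0k, ha0p, ha0v⟩, hEb⟩ := hE
      have hstep : stepB arr st ((k:Int)+1) =
          ((if st.1 < pSum arr (k+1) - st.2.2.1 then pSum arr (k+1) - st.2.2.1 else st.1),
           pSum arr (k+1),
           (if pSum arr (k+1) < st.2.2.1 then pSum arr (k+1) else st.2.2.1),
           st.2.2.2) := by
        unfold stepB
        rw [hmod0]
        simp only [reduceIte, hp']
      rw [hstep]
      refine ⟨rfl, ⟨?_, ?_⟩, ?_, ?_⟩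
      · -- min_even witness
        show ∃ a : Nat, a ≤ k+1 ∧ a % 2 = 0 ∧
          (if pSum arr (k+1) < st.2.2.1 then pSum arr (k+1) else st.2.2.1) = pSum arr a
        by_cases hlt : pSum arr (k+1) < st.2.2.1
        · exact ⟨k+1, le_rfl, hpar, by rw [if_pos hlt]⟩
        · exact ⟨a0, by omega, by omega, by rw [if_neg hlt]; exact ha0v⟩
      · -- min_even lower bound
        show ∀ a : Nat, a ≤ k+1 → a % 2 = 0 →
          (if pSum arr (k+1) < st.2.2.1 then pSum arr (k+1) else st.2.2.1) ≤ pSum arr a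
        intro a ha hap
        by_cases hak : a ≤ k
        · have := hEb a hak hap
          split_ifs with h <;> omega
        · have : a = k + 1 := by omega
          subst this
          split_ifs with h <;> omega
      · -- min_odd unchanged
        show InvMinO arr (k+1) st.2.2.2
        rcases hO with ⟨hk0, _⟩ | ⟨m, hm, ⟨a1, ha1, hap1, hav1⟩, hOb⟩
        · omega
        · refine Or.inr ⟨m, hm, ⟨a1, by omega, hap1, hav1⟩, ?_⟩
          intro a ha hap
          exact hOb a (by omega) hap
      · -- best
        show IsAns arr (k+1)
          (if st.1 < pSum arr (k+1) - st.2.2.1 then pSum arr (k+1) - st.2.2.1 else st.1)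
        exact IsAns_step arr k st.1 st.2.2.1 hAns
          ⟨a0, ha0k, by omega, ha0v⟩ (fun a ha hap => hEb a ha (by omega))
    · -- k+1 is odd: candidate from min_odd, update min_odd
      have hmod1 : PySem.Int.mod ((k:Int)+1) 2 = 1 := by
        rw [hmod]
        have : (k+1) % 2 = 1 := by omega
        rw [this]; rfl
      rcases hO with ⟨hk0, hnone⟩ | ⟨m, hm, ⟨a1, ha1, hap1, hav1⟩, hOb⟩
      · -- no odd prefix yet: k = 0
        have hstep : stepB arr st ((k:Int)+1) =
            (st.1, pSum arr (k+1), st.2.2.1, some (pSum arr (k+1))) := by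
          unfold stepB
          rw [hmod1, hnone]
          simp only [if_neg (by norm_num : ¬ (1:Int) = 0), hp']
        rw [hstep]
        subst hk0
        refine ⟨rfl, ⟨?_, ?_⟩, ?_, ?_⟩
        · show ∃ a : Nat, a ≤ 1 ∧ a % 2 = 0 ∧ st.2.2.1 = pSum arr a
          obtain ⟨⟨a0, ha0k, ha0p, ha0v⟩, _⟩ := hE
          exact ⟨a0, by omega, by omega, ha0v⟩
        · show ∀ a : Nat, a ≤ 1 → a % 2 = 0 → st.2.2.1 ≤ pSum arr a
          intro a ha hap
          obtain ⟨_, hEb⟩ := hE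
          exact hEb a (by omega) hap
        · show InvMinO arr 1 (some (pSum arr (0+1)))
          exact Or.inr ⟨pSum arr 1, rfl, ⟨1, le_rfl, by omega, rfl⟩, by
            intro a ha hap
            have : a = 1 := by omega
            subst this; exact le_rfl⟩
        · show IsAns arr 1 st.1
          obtain ⟨hnn, _, hat⟩ := hAns
          refine ⟨hnn, ?_, ?_⟩
          · intro a b hab hb hpar2; omega
          · rcases hat with h0 | ⟨a, b, h1, h2, h3, h4⟩
            · exact Or.inl h0
            · exact Or.inr ⟨a, b, h1, by omega, h3, h4⟩
      · have hstep : stepB arr st ((k:Int)+1) =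
            ((if st.1 < pSum arr (k+1) - m then pSum arr (k+1) - m else st.1),
             pSum arr (k+1), st.2.2.1,
             some (if pSum arr (k+1) < m then pSum arr (k+1) else m)) := by
          unfold stepB
          rw [hmod1, hm]
          simp only [if_neg (by norm_num : ¬ (1:Int) = 0), hp']
        rw [hstep]
        refine ⟨rfl, ⟨?_, ?_⟩, ?_, ?_⟩
        · show ∃ a : Nat, a ≤ k+1 ∧ a % 2 = 0 ∧ st.2.2.1 = pSum arr a
          obtain ⟨⟨a0, ha0k, ha0p, ha0v⟩, _⟩ := hE
          exact ⟨a0, by omega, by omega, ha0v⟩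
        · show ∀ a : Nat, a ≤ k+1 → a % 2 = 0 → st.2.2.1 ≤ pSum arr a
          intro a ha hap
          obtain ⟨_, hEb⟩ := hE
          exact hEb a (by omega) (by omega)
        · show InvMinO arr (k+1) (some (if pSum arr (k+1) < m then pSum arr (k+1) else m))
          refine Or.inr ⟨(if pSum arr (k+1) < m then pSum arr (k+1) else m), rfl, ?_, ?_⟩
          · by_cases hlt : pSum arr (k+1) < m
            · exact ⟨k+1, le_rfl, by omega, by rw [if_pos hlt]⟩
            · exact ⟨a1, by omega, hap1, by rw [if_neg hlt]; exact hav1⟩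
          · intro a ha hap
            by_cases hak : a ≤ k
            · have := hOb a hak hap
              split_ifs with h <;> omega
            · have : a = k + 1 := by omega
              subst this
              split_ifs with h <;> omega
        · show IsAns arr (k+1)
            (if st.1 < pSum arr (k+1) - m then pSum arr (k+1) - m else st.1)
          exact IsAns_step arr k st.1 m hAns
            ⟨a1, ha1, by omega, hav1⟩ (fun a ha hap => hOb a ha (by omega))

lemma portB_isAns (arr : List Int) (n : Int) (h2 : 2 ≤ n) (hlen : n ≤ (arr.length : Int)) :
    IsAns arr n.toNat (maxEvenLenSum_alt arr n) := by
  unfold maxEvenLenSum_alt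
  rw [if_neg (by omega)]
  have hcast : ((n.toNat : Nat) : Int) = n := by omega
  rw [← hcast]
  exact (loopB arr n.toNat (by omega) n.toNat le_rfl).2.2.2

-- ===== VERDICT (by name: the statement is the Claim_ definition above) =====
theorem maxEvenLenSum_spec : Claim_equal_maxEvenLenSum := by
  intro arr n _ hpre
  unfold Spec_maxEvenLenSum
  by_cases h2 : 2 ≤ n
  · exact IsAns_unique arr n.toNat _ _ (portA_isAns arr n h2 (hpre h2))
      (portB_isAns arr n h2 (hpre h2))
  · unfold maxEvenLenSum maxEvenLenSum_alt
    rw [if_pos (by omega), if_pos (by omega)]
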